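-- pv_equiv track=rewrite | github.com/Aniketsy/QuireBoard | src/ai/generator.py | extract_relevant_skills
-- ===== SOURCE A (Python) =====
-- def extract_relevant_skills(skills: list) -> str:
--     # Group skills by category
--     skill_categories = {
--         'Technical': [],
--         'Soft': [],
--         'Tools': []
--     }
--
--     for skill in skills:
--         # Add logic to categorize skills
--         if any(tech in skill.lower() for tech in ['python', 'java', 'sql', 'html']):
--             skill_categories['Technical'].append(skill)
--         elif any(tool in skill.lower() for tool in ['git', 'jira', 'office']):
--             skill_categories['Tools'].append(skill)
--         else:
--             skill_categories['Soft'].append(skill)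
--
--     # Format skills by category
--     formatted_skills = []
--     for category, category_skills in skill_categories.items():
--         if category_skills:
--             formatted_skills.append(f"{category}: {', '.join(category_skills)}")
--
--     return '\n'.join(formatted_skills)
-- ===== SOURCE B (Python) =====
-- def classify(skill):
--     low = skill.lower()
--     if any(tech in low for tech in ['python', 'java', 'sql', 'html']):
--         return 'Technical'
--     if any(tool in low for tool in ['git', 'jira', 'office']):
--         return 'Tools'
--     return 'Soft'
--
--
-- def extract_relevant_skills(skills: list) -> str:
--     lines = []
--     for category in ['Technical', 'Soft', 'Tools']:
--         group = [s for s in skills if classify(s) == category]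
--         if group:
--             lines.append(f"{category}: {', '.join(group)}")
--     return '\n'.join(lines)
-- ===== Notes on version B (the rewrite author's own statement) =====
-- stated objective: simpler
-- what changed: Replaces A's dict-accumulating pass plus separate dict-iteration formatting pass with a classify(skill) helper and a per-category filtering loop that builds each output line directly.
import Mathlib
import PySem

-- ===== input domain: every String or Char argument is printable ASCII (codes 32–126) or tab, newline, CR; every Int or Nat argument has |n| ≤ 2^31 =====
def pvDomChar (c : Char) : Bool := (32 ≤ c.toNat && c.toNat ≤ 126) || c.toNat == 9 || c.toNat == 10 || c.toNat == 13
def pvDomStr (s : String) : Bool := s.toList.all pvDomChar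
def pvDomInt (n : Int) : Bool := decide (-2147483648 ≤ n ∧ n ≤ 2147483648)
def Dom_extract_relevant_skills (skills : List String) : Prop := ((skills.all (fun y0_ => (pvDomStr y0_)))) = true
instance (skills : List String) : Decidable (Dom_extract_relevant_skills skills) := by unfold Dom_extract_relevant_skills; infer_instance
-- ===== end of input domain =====

-- B replaces A's dict-accumulating pass + separate formatting pass by a classify helper
-- and a per-category filtering loop (objective: simpler decomposition, same cost).

-- ===== PORT A =====
-- one fold building the three category lists in dict insertion order (Technical, Soft, Tools),
-- then the formatting pass over the dict's items
def extract_relevant_skills (skills : List String) : String :=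
  let cats := skills.foldl
    (fun (acc : List String × List String × List String) skill =>
      if ["python", "java", "sql", "html"].any
          (fun tech => PySem.Str.isIn tech (PySem.Str.lower skill)) then
        (acc.1 ++ [skill], acc.2.1, acc.2.2)
      else if ["git", "jira", "office"].any
          (fun tool => PySem.Str.isIn tool (PySem.Str.lower skill)) then
        (acc.1, acc.2.1, acc.2.2 ++ [skill])
      else
        (acc.1, acc.2.1 ++ [skill], acc.2.2))
    ([], [], [])
  let formatted := [("Technical", cats.1), ("Soft", cats.2.1), ("Tools", cats.2.2)].foldl
    (fun fs p => if p.2 ≠ [] then fs ++ [p.1 ++ ": " ++ PySem.Str.join ", " p.2] else fs) []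
  PySem.Str.join "\n" formatted

-- ===== PORT B =====
def classify (skill : String) : String :=
  if ["python", "java", "sql", "html"].any
      (fun tech => PySem.Str.isIn tech (PySem.Str.lower skill)) then "Technical"
  else if ["git", "jira", "office"].any
      (fun tool => PySem.Str.isIn tool (PySem.Str.lower skill)) then "Tools"
  else "Soft"

def extract_relevant_skills_alt (skills : List String) : String :=
  PySem.Str.join "\n"
    (["Technical", "Soft", "Tools"].foldl
      (fun lines cat =>
        let group := skills.filter (fun s => classify s == cat)
        if group ≠ [] then lines ++ [cat ++ ": " ++ PySem.Str.join ", " group] else lines)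
      [])

-- ===== PRECONDITION & SPEC =====
def Spec_extract_relevant_skills (skills : List String) (out : String) : Prop := out = extract_relevant_skills_alt skills
instance (skills : List String) (out : String) : Decidable (Spec_extract_relevant_skills skills out) := by unfold Spec_extract_relevant_skills; infer_instance

-- ===== CLAIM (what is proved, stated in full; the proofs are below) =====
def Claim_equal_extract_relevant_skills : Prop := ∀ (skills : List String), Dom_extract_relevant_skills skills → Spec_extract_relevant_skills skills (extract_relevant_skills skills)

-- ===== LEMMAS AND PROOFS =====

-- A's accumulating fold computes exactly B's three category filters (appended to the accumulator)
lemma cats_eq (skills : List String) (t s o : List String) :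
    skills.foldl
      (fun (acc : List String × List String × List String) skill =>
        if ["python", "java", "sql", "html"].any
            (fun tech => PySem.Str.isIn tech (PySem.Str.lower skill)) then
          (acc.1 ++ [skill], acc.2.1, acc.2.2)
        else if ["git", "jira", "office"].any
            (fun tool => PySem.Str.isIn tool (PySem.Str.lower skill)) then
          (acc.1, acc.2.1, acc.2.2 ++ [skill])
        else
          (acc.1, acc.2.1 ++ [skill], acc.2.2))
      (t, s, o)
    = (t ++ skills.filter (fun x => classify x == "Technical"),
       s ++ skills.filter (fun x => classify x == "Soft"),
       o ++ skills.filter (fun x => classify x == "Tools")) := by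
  induction skills generalizing t s o with
  | nil => simp
  | cons x xs ih =>
    simp only [List.foldl_cons, List.filter_cons]
    by_cases h1 : (["python", "java", "sql", "html"].any
        (fun tech => PySem.Str.isIn tech (PySem.Str.lower x))) = true
    · have hc : classify x = "Technical" := by unfold classify; rw [if_pos h1]
      rw [if_pos h1, ih, hc]
      simp
    · by_cases h2 : (["git", "jira", "office"].any
          (fun tool => PySem.Str.isIn tool (PySem.Str.lower x))) = true
      · have hc : classify x = "Tools" := by unfold classify; rw [if_neg h1, if_pos h2]
        rw [if_neg h1, if_pos h2, ih, hc]
        simp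
      · have hc : classify x = "Soft" := by unfold classify; rw [if_neg h1, if_neg h2]
        rw [if_neg h1, if_neg h2, ih, hc]
        simp

-- ===== VERDICT (by name: the statement is the Claim_ definition above) =====
theorem extract_relevant_skills_spec : Claim_equal_extract_relevant_skills := by
  intro skills _
  unfold Spec_extract_relevant_skills extract_relevant_skills extract_relevant_skills_alt
  rw [cats_eq]
  simp [List.foldl]
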